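-- pv_equiv track=rewrite | github.com/shree1892001/DocumenttExtractor | Services/DocumenProcessor2.py | _analyze_margins
-- ===== SOURCE A (Python) =====
-- from typing import List, Dict, Any, Optional, Tuple
--
-- def _analyze_margins(text: str) -> Dict[str, Any]:
--     """Analyze document margins"""
--     margins = {
--         'left_margin': 0,
--         'right_margin': 0,
--         'top_margin': 0,
--         'bottom_margin': 0
--     }
--
--     lines = text.split('\n')
--     if lines:
--
--         left_spaces = [len(line) - len(line.lstrip()) for line in lines if line.strip()]
--         if left_spaces:
--             margins['left_margin'] = min(left_spaces)
--
--         right_spaces = [len(line) - len(line.rstrip()) for line in lines if line.strip()]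
--         if right_spaces:
--             margins['right_margin'] = min(right_spaces)
--
--         top_empty = 0
--         for line in lines:
--             if not line.strip():
--                 top_empty += 1
--             else:
--                 break
--         margins['top_margin'] = top_empty
--
--         bottom_empty = 0
--         for line in reversed(lines):
--             if not line.strip():
--                 bottom_empty += 1
--             else:
--                 break
--         margins['bottom_margin'] = bottom_empty
--
--     return margins
-- ===== SOURCE B (Python) =====
-- def _analyze_margins(text: str):
--     """Analyze document margins (single pass over the lines)."""
--     left_min = None
--     right_min = None
--     top = 0
--     top_done = False
--     trailing = 0
--     for line in text.split('\n'):
--         if line.strip():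
--             l = len(line) - len(line.lstrip())
--             r = len(line) - len(line.rstrip())
--             if left_min is None or l < left_min:
--                 left_min = l
--             if right_min is None or r < right_min:
--                 right_min = r
--             top_done = True
--             trailing = 0
--         else:
--             if not top_done:
--                 top += 1
--             trailing += 1
--     return {
--         'left_margin': left_min if left_min is not None else 0,
--         'right_margin': right_min if right_min is not None else 0,
--         'top_margin': top,
--         'bottom_margin': trailing,
--     }
-- ===== Notes on version B (the rewrite author's own statement) =====
-- stated objective: alternative
-- what changed: All four margins are computed in one single traversal of the lines (running minima, a top-done flag and a trailing-empty counter) instead of A's four separate passes (two filtered comprehensions plus min, a forward loop and a reversed loop); same asymptotic cost.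
import Mathlib
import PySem

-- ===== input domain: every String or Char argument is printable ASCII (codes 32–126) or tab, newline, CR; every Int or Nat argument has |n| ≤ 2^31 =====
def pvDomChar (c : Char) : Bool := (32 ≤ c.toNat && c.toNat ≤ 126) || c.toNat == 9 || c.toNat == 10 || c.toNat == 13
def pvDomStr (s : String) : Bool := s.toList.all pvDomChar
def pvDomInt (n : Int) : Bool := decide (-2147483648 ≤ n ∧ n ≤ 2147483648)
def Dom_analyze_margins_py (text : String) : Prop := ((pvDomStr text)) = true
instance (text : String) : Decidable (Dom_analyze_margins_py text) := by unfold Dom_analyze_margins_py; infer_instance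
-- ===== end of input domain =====

-- B fuses A's four passes over the lines (two filtered comprehensions + min, a forward loop, a reversed loop) into one single traversal; return value proved equal.

-- shared line-level primitives (the same Python expressions occur in both programs)
def pvBlank (l : List Char) : Bool := (PySem.Chars.strip l).isEmpty
def pvLeftVal (l : List Char) : Int := (l.length : Int) - ((PySem.Chars.lstrip l).length : Int)
def pvRightVal (l : List Char) : Int := (l.length : Int) - ((PySem.Chars.rstrip l).length : Int)

-- ===== PORT A =====
-- A's 'for line in lines: if not line.strip(): top += 1 else: break'
def pvLeadBlank : List (List Char) → Int
  | [] => 0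
  | a :: xs => if pvBlank a then pvLeadBlank xs + 1 else 0

def analyze_margins_py (text : String) : List (String × Int) :=
  let margins : PySem.Dict String Int :=
    ((((PySem.Dict.empty).insert "left_margin" 0).insert "right_margin" 0).insert
        "top_margin" 0).insert "bottom_margin" 0
  let lines : List (List Char) := PySem.Chars.splitOn text.toList ['\n']
  if lines.isEmpty then margins.items else
    let left_spaces := (lines.filter (fun l => !pvBlank l)).map pvLeftVal
    let margins := match PySem.List.min? left_spaces (fun y => y) with
      | some m => margins.insert "left_margin" m
      | none => margins
    let right_spaces := (lines.filter (fun l => !pvBlank l)).map pvRightVal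
    let margins := match PySem.List.min? right_spaces (fun y => y) with
      | some m => margins.insert "right_margin" m
      | none => margins
    let margins := margins.insert "top_margin" (pvLeadBlank lines)
    let margins := margins.insert "bottom_margin" (pvLeadBlank lines.reverse)
    margins.items

-- ===== PORT B =====
-- B's 'if left_min is None or l < left_min: left_min = l'
def pvMinUpd (o : Option Int) (v : Int) : Option Int :=
  match o with
  | none => some v
  | some m => if v < m then some v else some m

-- B's single loop body: update running minima / top counter / trailing-empty counter
def pvStep (s : Option Int × Option Int × Int × Bool × Int) (line : List Char) :
    Option Int × Option Int × Int × Bool × Int :=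
  match s with
  | (lm, rm, top, done, tr) =>
    if pvBlank line then
      (lm, rm, if done then top else top + 1, done, tr + 1)
    else
      (pvMinUpd lm (pvLeftVal line), pvMinUpd rm (pvRightVal line), top, true, 0)

def analyze_margins_py_alt (text : String) : List (String × Int) :=
  let lines : List (List Char) := PySem.Chars.splitOn text.toList ['\n']
  match lines.foldl pvStep (none, none, 0, false, 0) with
  | (lm, rm, top, _, tr) =>
    [("left_margin", lm.getD 0), ("right_margin", rm.getD 0),
     ("top_margin", top), ("bottom_margin", tr)]

-- ===== PRECONDITION & SPEC =====
def Spec_analyze_margins_py (text : String) (out : List (String × Int)) : Prop := out = analyze_margins_py_alt text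
instance (text : String) (out : List (String × Int)) : Decidable (Spec_analyze_margins_py text out) := by unfold Spec_analyze_margins_py; infer_instance

-- ===== CLAIM (what is proved, stated in full; the proofs are below) =====
def Claim_equal_analyze_margins_py : Prop := ∀ (text : String), Dom_analyze_margins_py text → Spec_analyze_margins_py text (analyze_margins_py text)

-- ===== LEMMAS AND PROOFS =====

def pvNB (ls : List (List Char)) : Bool := ls.any (fun l => !pvBlank l)

def pvTrail : List (List Char) → Int
  | [] => 0
  | a :: xs => if pvNB xs then pvTrail xs else if pvBlank a then (xs.length : Int) + 1 else (xs.length : Int)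

def pvMins (o : Option Int) (vs : List Int) : Option Int := vs.foldl pvMinUpd o

lemma pvNB_cons (a : List Char) (xs : List (List Char)) :
    pvNB (a :: xs) = (!pvBlank a || pvNB xs) := by simp [pvNB]

lemma pv_foldl_step (ls : List (List Char)) (lm rm : Option Int) (top : Int) (done : Bool) (tr : Int) :
    ls.foldl pvStep (lm, rm, top, done, tr) =
      (pvMins lm ((ls.filter (fun l => !pvBlank l)).map pvLeftVal),
       pvMins rm ((ls.filter (fun l => !pvBlank l)).map pvRightVal),
       top + (if done then 0 else pvLeadBlank ls),
       done || pvNB ls,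
       if pvNB ls then pvTrail ls else tr + ls.length) := by
  induction ls generalizing lm rm top done tr with
  | nil => simp [pvMins, pvNB, pvLeadBlank]
  | cons a xs ih =>
    simp only [List.foldl_cons, pvStep]
    by_cases hb : pvBlank a = true
    · rw [if_pos hb, ih]
      refine Prod.ext ?_ (Prod.ext ?_ (Prod.ext ?_ (Prod.ext ?_ ?_))) <;>
        simp only [pvNB_cons, hb, Bool.not_true, Bool.false_or, List.filter_cons, pvLeadBlank,
          if_pos hb, Bool.not_true, Bool.false_eq_true, if_false, List.length_cons]
      · cases done <;> simp <;> ring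
      · by_cases hnb : pvNB xs = true
        · simp [hnb, pvTrail]
        · simp only [Bool.not_eq_true] at hnb
          simp only [hnb, Bool.false_eq_true, if_false]
          push_cast
          ring
    · simp only [Bool.not_eq_true] at hb
      rw [if_neg (by simp [hb]), ih]
      refine Prod.ext ?_ (Prod.ext ?_ (Prod.ext ?_ (Prod.ext ?_ ?_))) <;>
        simp only [pvNB_cons, hb, Bool.not_false, Bool.true_or, Bool.or_true, List.filter_cons,
          pvLeadBlank, Bool.false_eq_true, if_false, if_true, List.length_cons]
      · simp [pvMins, hb]
      · simp [pvMins, hb]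
      · cases done <;> simp [pvLeadBlank, hb]
      · simp only [pvTrail, pvNB_cons, hb, Bool.not_false, Bool.true_or, if_true]
        by_cases hnb : pvNB xs = true
        · simp [hnb]
        · simp only [Bool.not_eq_true] at hnb
          simp [hnb]

lemma pvLeadBlank_append (u v : List (List Char)) :
    pvLeadBlank (u ++ v) = if pvNB u then pvLeadBlank u else (u.length : Int) + pvLeadBlank v := by
  induction u with
  | nil => simp [pvLeadBlank, pvNB]
  | cons a xs ih =>
    by_cases hb : pvBlank a = true
    · simp only [List.cons_append, pvLeadBlank, hb, if_true, ih, pvNB_cons, Bool.not_true,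
        Bool.false_or, List.length_cons]
      by_cases hnb : pvNB xs = true
      · simp [hnb]
      · simp only [Bool.not_eq_true] at hnb
        simp only [hnb, Bool.false_eq_true, if_false]
        push_cast
        ring
    · simp only [Bool.not_eq_true] at hb
      simp [List.cons_append, pvLeadBlank, hb, pvNB_cons]

lemma pvLeadBlank_reverse (ls : List (List Char)) :
    pvLeadBlank ls.reverse = if pvNB ls then pvTrail ls else (ls.length : Int) := by
  induction ls with
  | nil => simp [pvLeadBlank, pvNB]
  | cons a xs ih =>
    have hrev : pvNB xs.reverse = pvNB xs := by simp [pvNB]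
    rw [List.reverse_cons, pvLeadBlank_append, hrev, ih]
    by_cases hnb : pvNB xs = true
    · simp [hnb, pvTrail, pvNB_cons]
    · simp only [Bool.not_eq_true] at hnb
      simp only [hnb, Bool.false_eq_true, if_false, pvTrail, pvNB_cons, Bool.false_or]
      by_cases hb : pvBlank a = true
      · simp only [hb, Bool.not_true, Bool.false_eq_true, Bool.false_or, Bool.or_self,
          if_false, if_true, List.length_reverse, List.length_cons, pvLeadBlank, if_pos hb]
        push_cast
        ring
      · simp only [Bool.not_eq_true] at hb
        simp [hb, pvLeadBlank]

lemma pvMins_some (t : List Int) (m : Int) :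
    pvMins (some m) t = some (t.foldl min m) := by
  induction t generalizing m with
  | nil => simp [pvMins]
  | cons v vs ih =>
    simp only [pvMins, List.foldl_cons, pvMinUpd] at *
    have hmv : (if v < m then some v else some m) = some (min m v) := by
      rcases le_or_gt m v with h | h
      · rw [if_neg (not_lt.mpr h), min_eq_left h]
      · rw [if_pos h, min_eq_right h.le]
    rw [hmv]
    exact ih (min m v)

lemma pvMins_getD (vs : List Int) :
    (pvMins none vs).getD 0 =
      (match PySem.List.min? vs (fun y => y) with
       | some m => m
       | none => (0 : Int)) := by
  cases vs with
  | nil => simp [pvMins, PySem.List.min?]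
  | cons x t =>
    have h1 : pvMins none (x :: t) = some (t.foldl min x) := by
      simpa [pvMins, pvMinUpd] using pvMins_some t x
    rw [h1, PySem.List.min?_id_cons]
    rfl

-- ===== VERDICT (by name: the statement is the Claim_ definition above) =====
theorem analyze_margins_py_spec : Claim_equal_analyze_margins_py := by
  unfold Claim_equal_analyze_margins_py
  intro text _
  unfold Spec_analyze_margins_py analyze_margins_py analyze_margins_py_alt
  simp only []
  set lines := PySem.Chars.splitOn text.toList ['\n'] with hlines
  rw [pv_foldl_step]
  simp only [Bool.false_eq_true, if_false, Bool.false_or, zero_add]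
  by_cases hemp : lines.isEmpty
  · rw [List.isEmpty_iff] at hemp
    rw [hemp]
    decide
  · rw [Bool.not_eq_true] at hemp
    rw [hemp]
    rw [pvLeadBlank_reverse]
    cases hL : PySem.List.min? ((lines.filter (fun l => !pvBlank l)).map pvLeftVal) (fun y => y) with
    | none =>
      have hL' := pvMins_getD ((lines.filter (fun l => !pvBlank l)).map pvLeftVal)
      rw [hL] at hL'
      cases hR : PySem.List.min? ((lines.filter (fun l => !pvBlank l)).map pvRightVal) (fun y => y) with
      | none =>
        have hR' := pvMins_getD ((lines.filter (fun l => !pvBlank l)).map pvRightVal)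
        rw [hR] at hR'
        simp [hL', hR', PySem.Dict.insert, PySem.Dict.empty]
      | some r =>
        have hR' := pvMins_getD ((lines.filter (fun l => !pvBlank l)).map pvRightVal)
        rw [hR] at hR'
        simp [hL', hR', PySem.Dict.insert, PySem.Dict.empty]
    | some m =>
      have hL' := pvMins_getD ((lines.filter (fun l => !pvBlank l)).map pvLeftVal)
      rw [hL] at hL'
      cases hR : PySem.List.min? ((lines.filter (fun l => !pvBlank l)).map pvRightVal) (fun y => y) with
      | none =>
        have hR' := pvMins_getD ((lines.filter (fun l => !pvBlank l)).map pvRightVal)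
        rw [hR] at hR'
        simp [hL', hR', PySem.Dict.insert, PySem.Dict.empty]
      | some r =>
        have hR' := pvMins_getD ((lines.filter (fun l => !pvBlank l)).map pvRightVal)
        rw [hR] at hR'
        simp [hL', hR', PySem.Dict.insert, PySem.Dict.empty]
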